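-- pv_equiv track=rewrite | github.com/ubiratantavares/python | coursera/introducao a ciencia da computacao com python parte 2/semana2/comparacao_entre_strings.py | primeiro_elemento
-- ===== SOURCE A (Python) =====
-- def primeiro_elemento(lista):
--     """
--     esta funcao recebe uma array de strings e devolve o primeiro string na ordem lexicográfica.
--     """
--     primeiro = lista[0].strip().lower()
--     idx = 1
--     while idx < len(lista):
--         if lista[idx].strip().lower() < primeiro:
--             primeiro = lista[idx].strip().lower()
--         idx += 1
--     return primeiro
-- ===== SOURCE B (Python) =====
-- def primeiro_elemento(lista):
--     """Sort the normalized strings and take the first; raises IndexError on [] like A."""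
--     return sorted(s.strip().lower() for s in lista)[0]
-- ===== Notes on version B (the rewrite author's own statement) =====
-- stated objective: idiomatic
-- what changed: Replaces the index-driven while loop that tracks a running minimum with a sort of the normalized strings followed by taking the first element.
import Mathlib
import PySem

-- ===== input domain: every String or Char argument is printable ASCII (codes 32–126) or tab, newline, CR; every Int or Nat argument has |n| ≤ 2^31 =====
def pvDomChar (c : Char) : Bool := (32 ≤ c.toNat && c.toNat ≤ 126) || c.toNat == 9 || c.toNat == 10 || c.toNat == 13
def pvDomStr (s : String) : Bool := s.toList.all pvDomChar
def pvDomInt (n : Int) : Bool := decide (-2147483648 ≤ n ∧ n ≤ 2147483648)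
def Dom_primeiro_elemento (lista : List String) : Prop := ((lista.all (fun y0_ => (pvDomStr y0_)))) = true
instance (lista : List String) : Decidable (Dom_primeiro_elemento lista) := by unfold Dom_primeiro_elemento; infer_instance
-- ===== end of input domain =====

-- B replaces A's running-minimum while loop with sorting the normalized list and taking its head (idiomatic, same asymptotics up to the sort).

-- s.strip().lower(), shared normalization
def pvNorm (s : String) : String := PySem.Str.lower (PySem.Str.strip s)

-- ===== PORT A =====
-- primeiro = lista[0]…; while idx < len(lista): if lista[idx]… < primeiro: primeiro = …
def primeiro_elemento (lista : List String) : String :=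
  match lista with
  | [] => ""   -- lista[0] raises IndexError; excluded by Pre_
  | x :: rest =>
    rest.foldl (fun primeiro s => if pvNorm s < primeiro then pvNorm s else primeiro) (pvNorm x)

-- ===== PORT B =====
-- return sorted(s.strip().lower() for s in lista)[0]
def primeiro_elemento_alt (lista : List String) : String :=
  (PySem.List.sorted (lista.map pvNorm) (fun x => x) false).headD ""   -- [0] of [] raises; excluded by Pre_

-- ===== PRECONDITION & SPEC =====
-- Both A (lista[0]) and B (sorted(...)[0]) raise IndexError on the empty list; Pre_ excludes exactly it.
def Pre_primeiro_elemento (lista : List String) : Prop := lista ≠ []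
instance (lista : List String) : Decidable (Pre_primeiro_elemento lista) := by unfold Pre_primeiro_elemento; infer_instance
def pvWitness_primeiro_elemento : List String := ["  B  ", "a", "C"]

def Spec_primeiro_elemento (lista : List String) (out : String) : Prop := out = primeiro_elemento_alt lista
instance (lista : List String) (out : String) : Decidable (Spec_primeiro_elemento lista out) := by unfold Spec_primeiro_elemento; infer_instance

-- ===== CLAIM (what is proved, stated in full; the proofs are below) =====
def Claim_equal_primeiro_elemento : Prop := ∀ (lista : List String), Dom_primeiro_elemento lista → Pre_primeiro_elemento lista → Spec_primeiro_elemento lista (primeiro_elemento lista)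

-- ===== LEMMAS AND PROOFS =====

-- A's loop is the running minimum of the normalized values.
theorem primeiro_eq_foldl_min (rest : List String) (p : String) :
    rest.foldl (fun primeiro s => if pvNorm s < primeiro then pvNorm s else primeiro) p
      = (rest.map pvNorm).foldl min p := by
  induction rest generalizing p with
  | nil => rfl
  | cons y t ih =>
    simp only [List.foldl, List.map]
    rw [ih]
    congr 1
    rcases lt_or_ge (pvNorm y) p with h | h
    · simp [h, min_eq_right (le_of_lt h)]
    · simp [not_lt.mpr h, min_eq_left h]

-- The head of the (stable) sort is the minimum value of the list.
theorem head_sorted_eq_min (l : List String) (x : String) (t : List String)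
    (hs : PySem.List.sorted l (fun y => y) false = x :: t)
    (m : String) (hm : PySem.List.min? l (fun y => y) = some m) : x = m := by
  have hxmem : x ∈ l := by
    have : x ∈ PySem.List.sorted l (fun y => y) false := by rw [hs]; exact List.mem_cons_self
    exact (PySem.List.mem_sorted l (fun y => y) false x).mp this
  have hmmem : m ∈ l := PySem.List.min?_mem hm
  exact le_antisymm (PySem.List.key_head_sorted_le l (fun y => y) hs m hmmem) (PySem.List.min?_isMin hm x hxmem)

-- ===== VERDICT (by name: the statement is the Claim_ definition above) =====
theorem primeiro_elemento_spec : Claim_equal_primeiro_elemento := by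
  intro lista _ hpre
  unfold Spec_primeiro_elemento primeiro_elemento primeiro_elemento_alt
  match lista with
  | [] => exact absurd rfl hpre
  | x :: rest =>
    have hmin : PySem.List.min? (pvNorm x :: rest.map pvNorm) (fun y => y)
        = some ((rest.map pvNorm).foldl min (pvNorm x)) := PySem.List.min?_id_cons (pvNorm x) (rest.map pvNorm)
    have hnn : PySem.List.sorted ((x :: rest).map pvNorm) (fun y => y) false ≠ [] := by
      rw [Ne, PySem.List.sorted_eq_nil_iff]; simp
    obtain ⟨h, t, hs⟩ := List.exists_cons_of_ne_nil hnn
    rw [hs]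
    simp only [List.headD_cons]
    rw [primeiro_eq_foldl_min]
    exact (head_sorted_eq_min ((x :: rest).map pvNorm) h t hs _ (by simpa using hmin)).symm
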